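-- pv_equiv track=rewrite | github.com/dgsim126/Algo_Study_2 | Programmers/김선엽/2503/250302/Flatten.py | solution
-- ===== SOURCE A (Python) =====
-- def solution(dump, box):
--     for j in range(dump):
--         high = max(box)
--         low = min(box)
--
--         high_index = box.index(max(box))
--         low_index = box.index(min(box))
--
--         box[high_index] -= 1
--         box[low_index] += 1
--
--     return max(box) - min(box)
-- ===== SOURCE B (Python) =====
-- # Closed-form leveling instead of step-by-step simulation; O(n log n) independent of dump.
-- # Note: A mutates `box` in place; B does not (the equivalence is about the return value).
-- def _reach(levels, t, cap):
--     # levels sorted descending, nonempty; smallest maximum reachable by removing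
--     # at most t units, one per step, always from a current maximum; floored at cap.
--     level = levels[0]
--     used = 0
--     k = 0
--     for v in levels:
--         nxt = v if v > cap else cap
--         if nxt < level:
--             cost = k * (level - nxt)
--             if used + cost > t:
--                 return level - (t - used) // k
--             used += cost
--             level = nxt
--         k += 1
--     cost = k * (level - cap)
--     if used + cost > t:
--         return level - (t - used) // k
--     return cap
--
--
-- def solution(dump, box):
--     n = len(box)
--     t = dump if dump > 0 else 0
--     s = sum(box)
--     q = s // n
--     r = s - q * n
--     cap_hi = q + 1 if r else q
--     desc = sorted(box, reverse=True)
--     hi = _reach(desc, t, cap_hi)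
--     lo = -_reach([-x for x in reversed(desc)], t, -q)
--     return hi - lo
-- ===== Notes on version B (the rewrite author's own statement) =====
-- stated objective: faster
-- what changed: Replaces the dump-times max/min/index/mutate simulation by a closed-form water-leveling computation: sort once, then walk the level groups to find the smallest reachable maximum and largest reachable minimum after t moves (capped at the stable ceil/floor-average levels), so the cost no longer depends on dump.
import Mathlib
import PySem

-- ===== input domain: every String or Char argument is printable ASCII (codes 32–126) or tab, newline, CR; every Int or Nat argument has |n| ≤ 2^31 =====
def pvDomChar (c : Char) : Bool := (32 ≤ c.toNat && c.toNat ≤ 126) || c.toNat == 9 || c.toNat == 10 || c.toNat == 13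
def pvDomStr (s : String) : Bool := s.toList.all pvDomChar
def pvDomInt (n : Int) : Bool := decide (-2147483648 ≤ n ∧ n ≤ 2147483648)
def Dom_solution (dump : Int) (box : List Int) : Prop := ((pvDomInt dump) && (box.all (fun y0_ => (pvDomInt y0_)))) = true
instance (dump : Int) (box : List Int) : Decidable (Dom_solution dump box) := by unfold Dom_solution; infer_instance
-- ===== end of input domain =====

-- B replaces A's dump-round max/min/index simulation by a closed-form water-leveling
-- computation (sort once, walk level groups), so the cost no longer depends on dump.
-- A mutates `box` in place, B does not; the equivalence proved here is about the return value.

-- ===== PORT A =====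
-- one round of the Python loop body: decrement the first max, increment the first min
def stepA (b : List Int) : List Int :=
  match PySem.List.max? b (fun x => x), PySem.List.min? b (fun x => x) with
  | some high, some low =>
    match PySem.List.index? b high, PySem.List.index? b low with
    | some hi, some li =>
      let b1 := PySem.List.pySetD b (hi : Int) (PySem.List.pyGetD b (hi : Int) 0 - 1)
      PySem.List.pySetD b1 (li : Int) (PySem.List.pyGetD b1 (li : Int) 0 + 1)
    | _, _ => b          -- unreachable: max/min are members of b
  | _, _ => b            -- max()/min() of [] raises ValueError: outside Pre_

def solution (dump : Int) (box : List Int) : Int :=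
  let final := (PySem.List.pyRange 0 dump 1).foldl (fun b _ => stepA b) box
  (PySem.List.max? final (fun x => x)).getD 0 - (PySem.List.min? final (fun x => x)).getD 0

-- ===== PORT B =====
-- the `for v in levels` loop of Source B's _reach, as structural recursion on the rest of the list
def reachAux (t cap : Int) : List Int → Int → Int → Int → Int
  | [], k, level, used =>
      let cost := k * (level - cap)
      if used + cost > t then level - PySem.Int.floordiv (t - used) k else cap
  | v :: rest, k, level, used =>
      let nxt := if v > cap then v else cap
      if nxt < level then
        let cost := k * (level - nxt)
        if used + cost > t then level - PySem.Int.floordiv (t - used) k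
        else reachAux t cap rest (k + 1) nxt (used + cost)
      else reachAux t cap rest (k + 1) level used

def reach (levels : List Int) (t cap : Int) : Int :=
  match levels with
  | [] => 0              -- levels[0] raises IndexError: outside Pre_
  | v0 :: _ => reachAux t cap levels 0 v0 0

def solution_alt (dump : Int) (box : List Int) : Int :=
  let n : Int := box.length
  let t := if dump > 0 then dump else 0
  let s := box.sum
  let q := PySem.Int.floordiv s n
  let r := s - q * n
  let capHi := if r ≠ 0 then q + 1 else q
  let desc := PySem.List.sorted box (fun x => x) true
  let hi := reach desc t capHi
  let lo := - reach ((desc.reverse).map (fun x => -x)) t (-q)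
  hi - lo

-- ===== PRECONDITION & SPEC =====
-- Pre_ excludes only the empty box, on which A raises ValueError (max of empty sequence).
def Pre_solution (dump : Int) (box : List Int) : Prop := box ≠ []
instance (dump : Int) (box : List Int) : Decidable (Pre_solution dump box) := by unfold Pre_solution; infer_instance
def pvWitness_solution : Int × List Int := (3, [1, 5, 2])
def Spec_solution (dump : Int) (box : List Int) (out : Int) : Prop := out = solution_alt dump box
instance (dump : Int) (box : List Int) (out : Int) : Decidable (Spec_solution dump box out) := by unfold Spec_solution; infer_instance

-- ===== CLAIM (what is proved, stated in full; the proofs are below) =====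
def Claim_equal_solution : Prop := ∀ (dump : Int) (box : List Int), Dom_solution dump box → Pre_solution dump box → Spec_solution dump box (solution dump box)

-- ===== LEMMAS AND PROOFS =====

-- units above level v / units missing below level w
def Ua (l : List Int) (v : Int) : Int := (l.map (fun x => max (x - v) 0)).sum
def La (l : List Int) (w : Int) : Int := (l.map (fun x => max (w - x) 0)).sum
-- first-element max/min as A's loop computes them
def listMax : List Int → Int
  | [] => 0
  | x :: t => t.foldl max x
def listMin : List Int → Int
  | [] => 0
  | x :: t => t.foldl min x

theorem Ua_nonneg (l : List Int) (v : Int) : 0 ≤ Ua l v := by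
  induction l with
  | nil => simp [Ua]
  | cons x t ih => simp only [Ua, List.map_cons, List.sum_cons] at *; positivity
theorem La_nonneg (l : List Int) (w : Int) : 0 ≤ La l w := by
  induction l with
  | nil => simp [La]
  | cons x t ih => simp only [La, List.map_cons, List.sum_cons] at *; positivity
theorem Ua_eq_zero_iff (l : List Int) (v : Int) : Ua l v = 0 ↔ ∀ x ∈ l, x ≤ v := by
  induction l with
  | nil => simp [Ua]
  | cons x t ih =>
    have h1 : 0 ≤ Ua t v := Ua_nonneg t v
    simp only [Ua, List.map_cons, List.sum_cons, List.mem_cons] at *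
    constructor
    · intro h
      have hx : max (x - v) 0 = 0 ∧ (t.map (fun x => max (x - v) 0)).sum = 0 := by
        constructor <;> omega
      intro y hy
      rcases hy with rfl | hy
      · omega
      · exact (ih.mp hx.2) y hy
    · intro h
      have hx : max (x - v) 0 = 0 := by have := h x (Or.inl rfl); omega
      have ht : (t.map (fun x => max (x - v) 0)).sum = 0 := ih.mpr (fun y hy => h y (Or.inr hy))
      omega
theorem La_eq_zero_iff (l : List Int) (w : Int) : La l w = 0 ↔ ∀ x ∈ l, w ≤ x := by
  induction l with
  | nil => simp [La]
  | cons x t ih =>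
    have h1 : 0 ≤ La t w := La_nonneg t w
    simp only [La, List.map_cons, List.sum_cons, List.mem_cons] at *
    constructor
    · intro h
      have hx : max (w - x) 0 = 0 ∧ (t.map (fun x => max (w - x) 0)).sum = 0 := by
        constructor <;> omega
      intro y hy
      rcases hy with rfl | hy
      · omega
      · exact (ih.mp hx.2) y hy
    · intro h
      have hx : max (w - x) 0 = 0 := by have := h x (Or.inl rfl); omega
      have ht : (t.map (fun x => max (w - x) 0)).sum = 0 := ih.mpr (fun y hy => h y (Or.inr hy))
      omega
theorem Ua_anti (l : List Int) {v w : Int} (h : v ≤ w) : Ua l w ≤ Ua l v := by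
  induction l with
  | nil => simp [Ua]
  | cons x t ih => simp only [Ua, List.map_cons, List.sum_cons] at *; omega
theorem Ua_ge_elem (l : List Int) (v : Int) {x : Int} (hx : x ∈ l) : max (x - v) 0 ≤ Ua l v := by
  induction l with
  | nil => simp at hx
  | cons y t ih =>
    rcases List.mem_cons.mp hx with rfl | hx
    · have := Ua_nonneg t v
      simp only [Ua, List.map_cons, List.sum_cons] at *; omega
    · have := ih hx
      simp only [Ua, List.map_cons, List.sum_cons] at *; omega
theorem La_ge_elem (l : List Int) (w : Int) {x : Int} (hx : x ∈ l) : max (w - x) 0 ≤ La l w := by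
  induction l with
  | nil => simp at hx
  | cons y t ih =>
    rcases List.mem_cons.mp hx with rfl | hx
    · have := La_nonneg t w
      simp only [La, List.map_cons, List.sum_cons] at *; omega
    · have := ih hx
      simp only [La, List.map_cons, List.sum_cons] at *; omega
theorem Ua_of_le (l : List Int) (v : Int) (h : ∀ x ∈ l, v ≤ x) :
    Ua l v = l.sum - l.length * v := by
  induction l with
  | nil => simp [Ua]
  | cons x t ih =>
    have hx : v ≤ x := h x (List.mem_cons_self)
    have ht := ih (fun y hy => h y (List.mem_cons_of_mem _ hy))
    simp only [Ua, List.map_cons, List.sum_cons, List.length_cons] at *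
    rw [ht]
    have hm : max (x - v) 0 = x - v := by omega
    rw [hm]
    push_cast
    ring
theorem Ua_perm {l l' : List Int} (h : l.Perm l') (v : Int) : Ua l v = Ua l' v := by
  unfold Ua
  exact (h.map _).sum_eq
theorem Ua_append (a b : List Int) (v : Int) : Ua (a ++ b) v = Ua a v + Ua b v := by
  simp [Ua]
theorem Ua_neg_map (l : List Int) (w : Int) : Ua (l.map (fun x => -x)) (-w) = La l w := by
  unfold Ua La
  rw [List.map_map]
  congr 1
  apply List.map_congr_left
  intro x hx
  simp only [Function.comp]
  omega
theorem sum_set (l : List Int) (i : Nat) (x : Int) (h : i < l.length) :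
    (l.set i x).sum = l.sum - l[i] + x := by
  induction l generalizing i with
  | nil => simp at h
  | cons y t ih =>
    cases i with
    | zero => simp; ring
    | succ j =>
      simp only [List.set_cons_succ, List.sum_cons, List.getElem_cons_succ]
      rw [ih j (by simpa using h)]
      ring

theorem listMax_mem {l : List Int} (h : l ≠ []) : listMax l ∈ l := by
  match l, h with
  | x :: t, _ =>
    simp only [listMax]
    rcases PySem.List.foldl_max_mem t x with h | h
    · rw [h]; exact List.mem_cons_self
    · exact List.mem_cons_of_mem _ h
theorem le_listMax {l : List Int} (x : Int) (hx : x ∈ l) : x ≤ listMax l := by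
  match l, hx with
  | y :: t, hx =>
    simp only [listMax]
    rcases List.mem_cons.mp hx with rfl | hx
    · exact (PySem.List.le_foldl_max t x).1
    · exact (PySem.List.le_foldl_max t y).2 x hx
theorem listMin_mem {l : List Int} (h : l ≠ []) : listMin l ∈ l := by
  match l, h with
  | x :: t, _ =>
    simp only [listMin]
    rcases PySem.List.foldl_min_mem t x with h | h
    · rw [h]; exact List.mem_cons_self
    · exact List.mem_cons_of_mem _ h
theorem listMin_le {l : List Int} (x : Int) (hx : x ∈ l) : listMin l ≤ x := by
  match l, hx with
  | y :: t, hx =>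
    simp only [listMin]
    rcases List.mem_cons.mp hx with rfl | hx
    · exact (PySem.List.foldl_min_le t x).1
    · exact (PySem.List.foldl_min_le t y).2 x hx

-- dissection of one step of A
theorem stepA_cases {l : List Int} (h : l ≠ []) :
    (listMax l = listMin l ∧ stepA l = l) ∨
    (listMax l ≠ listMin l ∧ ∃ hi li : Nat, ∃ h1 : hi < l.length, ∃ h2 : li < l.length,
      hi ≠ li ∧ l[hi] = listMax l ∧ l[li] = listMin l ∧
      stepA l = (l.set hi (listMax l - 1)).set li (listMin l + 1)) := by
  obtain ⟨x, tl, rfl⟩ : ∃ x tl, l = x :: tl := by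
    cases l with
    | nil => exact absurd rfl h
    | cons x tl => exact ⟨x, tl, rfl⟩
  set l := x :: tl with hl
  have hM : listMax l ∈ l := listMax_mem h
  have hm : listMin l ∈ l := listMin_mem h
  obtain ⟨hi, hhi⟩ : ∃ k, PySem.List.index? l (listMax l) = some k := by
    have := (PySem.List.index?_isSome_iff l (listMax l)).mpr hM
    exact Option.isSome_iff_exists.mp this
  obtain ⟨li, hli⟩ : ∃ k, PySem.List.index? l (listMin l) = some k := by
    have := (PySem.List.index?_isSome_iff l (listMin l)).mpr hm
    exact Option.isSome_iff_exists.mp this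
  obtain ⟨hhilt, hhiv, -⟩ := PySem.List.getElem_of_index?_eq_some hhi
  obtain ⟨hlilt, hliv, -⟩ := PySem.List.getElem_of_index?_eq_some hli
  have hstep : stepA l = (l.set hi (l.getD hi 0 - 1)).set li
      (((l.set hi (l.getD hi 0 - 1)).getD li 0) + 1) := by
    show stepA (x :: tl) = _
    rw [stepA, PySem.List.max?_id_cons, PySem.List.min?_id_cons]
    show (match PySem.List.index? l (listMax l), PySem.List.index? l (listMin l) with
      | some hi, some li =>
        let b1 := PySem.List.pySetD l (hi : Int) (PySem.List.pyGetD l (hi : Int) 0 - 1)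
        PySem.List.pySetD b1 (li : Int) (PySem.List.pyGetD b1 (li : Int) 0 + 1)
      | _, _ => l) = _
    rw [hhi, hli]
    simp [PySem.List.pySetD_natCast, PySem.List.pyGetD_natCast]
  rw [List.getD_eq_getElem l 0 hhilt, hhiv] at hstep
  by_cases heq : listMax l = listMin l
  · left
    refine ⟨heq, ?_⟩
    have hsame : hi = li := by
      rw [← heq] at hli
      rw [hli] at hhi
      exact (Option.some.inj hhi).symm
    subst hsame
    rw [List.getD_eq_getElem _ 0 (by simpa using hhilt), List.getElem_set_self] at hstep
    rw [hstep, List.set_set, sub_add_cancel, ← hhiv, List.set_getElem_self]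
  · right
    have hne : hi ≠ li := by
      intro hcontra
      subst hcontra
      exact heq (hhiv.symm.trans hliv)
    refine ⟨heq, hi, li, hhilt, hlilt, hne, hhiv, hliv, ?_⟩
    rw [List.getD_eq_getElem _ 0 (by simpa using hlilt), List.getElem_set_ne hne, hliv] at hstep
    exact hstep

theorem stepA_length {l : List Int} (h : l ≠ []) : (stepA l).length = l.length := by
  rcases stepA_cases h with ⟨-, he⟩ | ⟨-, hi, li, h1, h2, -, -, -, he⟩ <;> simp [he]
theorem stepA_sum {l : List Int} (h : l ≠ []) : (stepA l).sum = l.sum := by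
  rcases stepA_cases h with ⟨-, he⟩ | ⟨-, hi, li, h1, h2, hne, hMv, hmv, he⟩
  · rw [he]
  · rw [he, sum_set _ li _ (by simpa using h2), List.getElem_set_ne hne, hmv,
      sum_set _ hi _ h1, hMv]
    ring
theorem La_of_ge (l : List Int) (w : Int) (h : ∀ x ∈ l, x ≤ w) :
    La l w = l.length * w - l.sum := by
  induction l with
  | nil => simp [La]
  | cons x t ih =>
    have hx : x ≤ w := h x (List.mem_cons_self)
    have ht := ih (fun y hy => h y (List.mem_cons_of_mem _ hy))
    simp only [La, List.map_cons, List.sum_cons, List.length_cons] at *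
    rw [ht]
    have hm : max (w - x) 0 = w - x := by omega
    rw [hm]
    push_cast
    ring

theorem Ua_set (l : List Int) (i : Nat) (a v : Int) (h : i < l.length) :
    Ua (l.set i a) v = Ua l v - max (l[i] - v) 0 + max (a - v) 0 := by
  unfold Ua
  rw [List.map_set, sum_set _ i _ (by simpa using h), List.getElem_map]

theorem La_set (l : List Int) (i : Nat) (a w : Int) (h : i < l.length) :
    La (l.set i a) w = La l w - max (w - l[i]) 0 + max (w - a) 0 := by
  unfold La
  rw [List.map_set, sum_set _ i _ (by simpa using h), List.getElem_map]

theorem Ua_step {l : List Int} (h : l ≠ []) {v : Int} (hv : l.sum ≤ (l.length : Int) * v) :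
    Ua (stepA l) v = max (Ua l v - 1) 0 := by
  have hn : 0 < l.length := List.length_pos_iff.mpr h
  rcases stepA_cases h with ⟨heq, he⟩ | ⟨hne, hi, li, h1, h2, hij, hMv, hmv, he⟩
  · -- all elements equal: Ua l v = 0
    have hM0 : Ua l (listMax l) = 0 :=
      (Ua_eq_zero_iff _ _).mpr (fun x hx => le_listMax x hx)
    have hm0 : Ua l (listMin l) = l.sum - l.length * listMin l :=
      Ua_of_le _ _ (fun x hx => listMin_le x hx)
    rw [heq] at hM0
    have hsum : l.sum = (l.length : Int) * listMin l := by omega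
    have hMle : listMin l ≤ v := by
      rw [hsum] at hv
      exact le_of_mul_le_mul_left hv (by exact_mod_cast hn)
    have hU0 : Ua l v = 0 := (Ua_eq_zero_iff _ _).mpr
      (fun x hx => le_trans (heq ▸ le_listMax x hx) hMle)
    rw [he, hU0]
    omega
  · have hmlt : listMin l < v := by
      by_contra hle
      push_neg at hle
      have hall : ∀ x ∈ l, v ≤ x := fun x hx => le_trans hle (listMin_le x hx)
      have hU : Ua l v = l.sum - l.length * v := Ua_of_le _ _ hall
      have hU0 : Ua l v = 0 := le_antisymm (by omega) (Ua_nonneg _ _)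
      have hallv : ∀ x ∈ l, x = v := fun x hx =>
        le_antisymm ((Ua_eq_zero_iff _ _).mp hU0 x hx) (hall x hx)
      exact hne ((hallv _ (listMax_mem h)).trans (hallv _ (listMin_mem h)).symm)
    have hli' : li < (l.set hi (listMax l - 1)).length := by simpa using h2
    have hget : (l.set hi (listMax l - 1))[li] = listMin l := by
      rw [List.getElem_set_ne hij, hmv]
    rw [he, Ua_set _ li _ v (by simpa using h2), hget, Ua_set _ hi _ v h1, hMv]
    have hUge : max (listMax l - v) 0 ≤ Ua l v := hMv ▸ Ua_ge_elem l v (by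
      exact hMv ▸ List.getElem_mem h1)
    have hUnn := Ua_nonneg l v
    rcases le_or_gt (listMax l) v with hMle | hMgt
    · have hU0 : Ua l v = 0 := (Ua_eq_zero_iff _ _).mpr
        (fun x hx => le_trans (le_listMax x hx) hMle)
      omega
    · omega
theorem La_step {l : List Int} (h : l ≠ []) {w : Int} (hw : (l.length : Int) * w ≤ l.sum) :
    La (stepA l) w = max (La l w - 1) 0 := by
  have hn : 0 < l.length := List.length_pos_iff.mpr h
  rcases stepA_cases h with ⟨heq, he⟩ | ⟨hne, hi, li, h1, h2, hij, hMv, hmv, he⟩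
  · have hM0 : Ua l (listMax l) = 0 :=
      (Ua_eq_zero_iff _ _).mpr (fun x hx => le_listMax x hx)
    have hm0 : Ua l (listMin l) = l.sum - l.length * listMin l :=
      Ua_of_le _ _ (fun x hx => listMin_le x hx)
    rw [heq] at hM0
    have hsum : l.sum = (l.length : Int) * listMin l := by omega
    have hwle : w ≤ listMin l := by
      rw [hsum] at hw
      exact le_of_mul_le_mul_left hw (by exact_mod_cast hn)
    have hL0 : La l w = 0 := (La_eq_zero_iff _ _).mpr
      (fun x hx => le_trans hwle (listMin_le x hx))
    rw [he, hL0]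
    omega
  · have hMgt : w < listMax l := by
      by_contra hle
      push_neg at hle
      have hall : ∀ x ∈ l, x ≤ w := fun x hx => le_trans (le_listMax x hx) hle
      have hL : La l w = l.length * w - l.sum := La_of_ge _ _ hall
      have hL0 : La l w = 0 := le_antisymm (by omega) (La_nonneg _ _)
      have hallw : ∀ x ∈ l, x = w := fun x hx =>
        le_antisymm (hall x hx) ((La_eq_zero_iff _ _).mp hL0 x hx)
      exact hne ((hallw _ (listMax_mem h)).trans (hallw _ (listMin_mem h)).symm)
    have hget : (l.set hi (listMax l - 1))[li]'(by simpa using h2) = listMin l := by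
      rw [List.getElem_set_ne hij, hmv]
    rw [he, La_set _ li _ w (by simpa using h2), hget, La_set _ hi _ w h1, hMv]
    have hLge : max (w - listMin l) 0 ≤ La l w := hmv ▸ La_ge_elem l w (by
      exact hmv ▸ List.getElem_mem h2)
    have hLnn := La_nonneg l w
    rcases le_or_gt w (listMin l) with hmle | hmgt
    · have hL0 : La l w = 0 := (La_eq_zero_iff _ _).mpr
        (fun x hx => le_trans hmle (listMin_le x hx))
      omega
    · omega

theorem foldl_const_iterate (xs : List Int) (g : List Int → List Int) (init : List Int) :
    xs.foldl (fun b _ => g b) init = g^[xs.length] init := by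
  induction xs generalizing init with
  | nil => rfl
  | cons x t ih =>
    simp only [List.foldl_cons, List.length_cons]
    rw [ih (g init), Function.iterate_succ_apply]

-- the invariant carried through all dump rounds
theorem iterate_inv {l : List Int} (h : l ≠ []) (t : Nat) :
    (stepA^[t] l).length = l.length ∧ (stepA^[t] l).sum = l.sum ∧
    (∀ v : Int, l.sum ≤ (l.length : Int) * v → Ua (stepA^[t] l) v = max (Ua l v - t) 0) ∧
    (∀ w : Int, (l.length : Int) * w ≤ l.sum → La (stepA^[t] l) w = max (La l w - t) 0) := by
  induction t with
  | zero =>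
    refine ⟨rfl, rfl, ?_, ?_⟩ <;> intro u hu
    · have := Ua_nonneg l u
      simp only [Function.iterate_zero_apply, Nat.cast_zero]
      omega
    · have := La_nonneg l u
      simp only [Function.iterate_zero_apply, Nat.cast_zero]
      omega
  | succ k ih =>
    obtain ⟨ihl, ihs, ihU, ihL⟩ := ih
    have hf : stepA^[k] l ≠ [] := by
      intro hcon
      rw [hcon] at ihl
      exact h (List.eq_nil_of_length_eq_zero ihl.symm)
    rw [Function.iterate_succ_apply']
    refine ⟨(stepA_length hf).trans ihl, (stepA_sum hf).trans ihs, ?_, ?_⟩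
    · intro v hv
      have hv' : (stepA^[k] l).sum ≤ ((stepA^[k] l).length : Int) * v := by
        rw [ihs, ihl]; exact hv
      rw [Ua_step hf hv', ihU v hv]
      have := Ua_nonneg l v
      push_cast
      omega
    · intro w hw
      have hw' : ((stepA^[k] l).length : Int) * w ≤ (stepA^[k] l).sum := by
        rw [ihs, ihl]; exact hw
      rw [La_step hf hw', ihL w hw]
      have := La_nonneg l w
      push_cast
      omega

-- B side: reachAux when the level has already hit the cap
theorem reachAux_at_cap (t cap : Int) (rest : List Int) (k used : Int) (hu : used ≤ t) :
    reachAux t cap rest k cap used = cap := by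
  induction rest generalizing k with
  | nil =>
    simp only [reachAux]
    rw [sub_self, mul_zero]
    have : ¬ used + 0 > t := by omega
    rw [if_neg this]
  | cons v rest ih =>
    simp only [reachAux]
    have hnot : ¬ ((if v > cap then v else cap) < cap) := by split_ifs <;> omega
    rw [if_neg hnot]
    exact ih (k + 1)

theorem Ua_split {L done rest : List Int} {level v : Int} (hL : L = done ++ rest)
    (hd : ∀ x ∈ done, level ≤ x) (hr : ∀ x ∈ rest, x ≤ v) (hv : v ≤ level) :
    Ua L v = Ua L level + (done.length : Int) * (level - v) := by
  subst hL
  have hrl : ∀ x ∈ rest, x ≤ level := fun x hx => le_trans (hr x hx) hv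
  rw [Ua_append, Ua_append, (Ua_eq_zero_iff rest v).mpr hr,
    (Ua_eq_zero_iff rest level).mpr hrl,
    Ua_of_le done v (fun x hx => le_trans hv (hd x hx)), Ua_of_le done level hd]
  ring

-- the main loop invariant of B's _reach
theorem reachClose (t cap : Int) (L done rest' : List Int) (level nxt used : Int)
    (hL : L = done ++ rest') (hd0 : done ≠ []) (hd : ∀ x ∈ done, level ≤ x)
    (hr' : ∀ x ∈ rest', x ≤ nxt) (hcn : cap ≤ nxt) (hnl : nxt ≤ level)
    (hu : used = Ua L level) (hut : used ≤ t)
    (hgt : used + (done.length : Int) * (level - nxt) > t) :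
    cap ≤ level - PySem.Int.floordiv (t - used) (done.length : Int) ∧
    Ua L (level - PySem.Int.floordiv (t - used) (done.length : Int)) ≤ t ∧
    ∀ w : Int, cap ≤ w → Ua L w ≤ t →
      level - PySem.Int.floordiv (t - used) (done.length : Int) ≤ w := by
  have hK : (0 : Int) < (done.length : Int) := by
    have : done.length ≠ 0 := fun hcon => hd0 (List.eq_nil_of_length_eq_zero hcon)
    omega
  set K : Int := (done.length : Int) with hKdef
  set d : Int := PySem.Int.floordiv (t - used) K with hdd
  have hiff : ∀ q : Int, q ≤ d ↔ q * K ≤ t - used :=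
    fun q => PySem.Int.le_floordiv_iff_mul_le hK
  have hd1 : d * K ≤ t - used := (hiff d).mp le_rfl
  have hd0' : 0 ≤ d := (hiff 0).mpr (by rw [zero_mul]; omega)
  have hUnxt : Ua L nxt = used + K * (level - nxt) := by
    rw [hu, Ua_split hL hd hr' hnl]
  have hlt : d < level - nxt := by
    by_contra hcon
    push_neg at hcon
    have h2 : (level - nxt) * K ≤ t - used := (hiff _).mp hcon
    rw [mul_comm] at hgt
    linarith
  refine ⟨by linarith, ?_, ?_⟩
  · have hρge : nxt ≤ level - d := by linarith
    have hρle : level - d ≤ level := by linarith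
    have hU : Ua L (level - d) = used + K * d := by
      rw [hu, Ua_split hL hd (fun x hx => le_trans (hr' x hx) hρge) hρle]
      rw [hKdef]
      ring
    rw [hU, mul_comm]
    linarith
  · intro w hcw hUw
    rcases le_or_gt level w with hlw | hlw
    · linarith
    · rcases le_or_gt nxt w with hnw | hnw
      · have hUww : Ua L w = used + K * (level - w) := by
          rw [hu, Ua_split hL hd (fun x hx => le_trans (hr' x hx) hnw) (le_of_lt hlw)]
        have h3 : (level - w) * K ≤ t - used := by
          rw [mul_comm]
          linarith [hUww ▸ hUw]
        have := (hiff (level - w)).mpr h3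
        linarith
      · have := Ua_anti L (le_of_lt hnw)
        linarith

theorem reachAux_spec (t cap : Int) (L : List Int) (hs : L.Pairwise (· ≥ ·))
    (rest : List Int) :
    ∀ (done : List Int) (level used : Int),
    L = done ++ rest → done ≠ [] → (∀ x ∈ done, level ≤ x) →
    (∀ x ∈ rest, x ≤ level) → used = Ua L level → used ≤ t →
    cap ≤ level →
    cap ≤ reachAux t cap rest (done.length : Int) level used ∧
    Ua L (reachAux t cap rest (done.length : Int) level used) ≤ t ∧
    ∀ w : Int, cap ≤ w → Ua L w ≤ t →
      reachAux t cap rest (done.length : Int) level used ≤ w := by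
  induction rest with
  | nil =>
    intro done level used hL hd0 hd hr hu hut hc
    by_cases hlc : level = cap
    · subst hlc
      rw [reachAux_at_cap t level [] _ used hut]
      exact ⟨le_rfl, hu ▸ hut, fun w hw _ => hw⟩
    · have hcl : cap < level := lt_of_le_of_ne hc (Ne.symm hlc)
      simp only [reachAux]
      split_ifs with hgt
      · exact reachClose t cap L done [] level cap used hL hd0 hd (by simp)
          le_rfl (le_of_lt hcl) hu hut hgt
      · push_neg at hgt
        have hUcap : Ua L cap = used + (done.length : Int) * (level - cap) := by
          rw [hu, Ua_split hL hd (by simp) (le_of_lt hcl)]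
        exact ⟨le_rfl, by rw [hUcap]; linarith, fun w hw _ => hw⟩
  | cons v rest' ih =>
    intro done level used hL hd0 hd hr hu hut hc
    have hvle : v ≤ level := hr v List.mem_cons_self
    have hsub : (v :: rest').Pairwise (· ≥ ·) :=
      hs.sublist (hL ▸ List.sublist_append_right done _)
    have hrest' : ∀ x ∈ rest', x ≤ v := (List.pairwise_cons.mp hsub).1
    have happ : L = (done ++ [v]) ++ rest' := by rw [hL]; simp
    have hlen1 : ((done ++ [v]).length : Int) = (done.length : Int) + 1 := by
      simp
    simp only [reachAux]
    by_cases hvc : v > cap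
    · rw [if_pos hvc]
      by_cases hnl : v < level
      · rw [if_pos hnl]
        split_ifs with hgt
        · exact reachClose t cap L done (v :: rest') level v used hL hd0 hd
            (by intro x hx; rcases List.mem_cons.mp hx with rfl | hx
                · exact le_rfl
                · exact hrest' x hx)
            (le_of_lt hvc) (le_of_lt hnl) hu hut hgt
        · push_neg at hgt
          have hUv : Ua L v = used + (done.length : Int) * (level - v) := by
            rw [hu, Ua_split hL hd
              (by intro x hx; rcases List.mem_cons.mp hx with rfl | hx
                  · exact le_rfl
                  · exact hrest' x hx) hvle]
          have := ih (done ++ [v]) v (used + (done.length : Int) * (level - v))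
            happ (by simp)
            (by intro x hx
                rcases List.mem_append.mp hx with hx | hx
                · exact le_trans (le_of_lt hnl) (hd x hx)
                · simp at hx; omega)
            hrest' hUv.symm hgt (le_of_lt hvc)
          rw [hlen1] at this
          exact this
      · have hveq : v = level := le_antisymm hvle (not_lt.mp hnl)
        rw [if_neg hnl]
        have := ih (done ++ [v]) level used happ (by simp)
          (by intro x hx
              rcases List.mem_append.mp hx with hx | hx
              · exact hd x hx
              · simp at hx; omega)
          (fun x hx => le_trans (hrest' x hx) hvle) hu hut hc
        rw [hlen1] at this
        exact this
    · have hvcap : v ≤ cap := not_lt.mp hvc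
      rw [if_neg hvc]
      by_cases hnl : cap < level
      · rw [if_pos hnl]
        split_ifs with hgt
        · exact reachClose t cap L done (v :: rest') level cap used hL hd0 hd
            (by intro x hx; rcases List.mem_cons.mp hx with rfl | hx
                · exact hvcap
                · exact le_trans (hrest' x hx) hvcap)
            le_rfl (le_of_lt hnl) hu hut hgt
        · push_neg at hgt
          have hUcap : Ua L cap = used + (done.length : Int) * (level - cap) := by
            rw [hu, Ua_split hL hd
              (by intro x hx; rcases List.mem_cons.mp hx with rfl | hx
                  · exact hvcap
                  · exact le_trans (hrest' x hx) hvcap) (le_of_lt hnl)]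
          rw [reachAux_at_cap t cap rest' _ _ (by linarith)]
          exact ⟨le_rfl, by rw [hUcap]; linarith, fun w hw _ => hw⟩
      · have hlc : level = cap := le_antisymm (not_lt.mp hnl) hc
        subst hlc
        rw [if_neg (by omega)]
        rw [reachAux_at_cap t level rest' _ used hut]
        exact ⟨le_rfl, hu ▸ hut, fun w hw _ => hw⟩

theorem reach_spec (t cap : Int) (L : List Int) (hL : L ≠ []) (hs : L.Pairwise (· ≥ ·))
    (ht : 0 ≤ t) (hch : cap ≤ listMax L) :
    cap ≤ reach L t cap ∧ Ua L (reach L t cap) ≤ t ∧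
    ∀ w : Int, cap ≤ w → Ua L w ≤ t → reach L t cap ≤ w := by
  obtain ⟨v0, rest, rfl⟩ : ∃ v0 rest, L = v0 :: rest := by
    cases L with
    | nil => exact absurd rfl hL
    | cons v0 rest => exact ⟨v0, rest, rfl⟩
  have hhead : ∀ x ∈ v0 :: rest, x ≤ v0 := by
    intro x hx
    rcases List.mem_cons.mp hx with rfl | hx
    · exact le_rfl
    · exact (List.pairwise_cons.mp hs).1 x hx
  have hc0 : cap ≤ v0 := le_trans hch (hhead _ (listMax_mem hL))
  have hstep1 : reach (v0 :: rest) t cap = reachAux t cap rest 1 v0 0 := by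
    simp only [reach, reachAux]
    have hnot : ¬ ((if v0 > cap then v0 else cap) < v0) := by split_ifs <;> omega
    rw [if_neg hnot]
    norm_num
  rw [hstep1]
  have h1 : ((([v0] : List Int)).length : Int) = 1 := by simp
  have := reachAux_spec t cap (v0 :: rest) hs rest [v0] v0 0 (by simp) (by simp)
    (by intro x hx; simp at hx; omega) (fun x hx => hhead x (List.mem_cons_of_mem _ hx))
    ((Ua_eq_zero_iff _ _).mpr hhead).symm ht hc0
  rw [h1] at this
  exact this

theorem max?_getD (l : List Int) (h : l ≠ []) :
    (PySem.List.max? l (fun x => x)).getD 0 = listMax l := by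
  match l, h with
  | x :: t, _ => rw [PySem.List.max?_id_cons]; rfl

theorem min?_getD (l : List Int) (h : l ≠ []) :
    (PySem.List.min? l (fun x => x)).getD 0 = listMin l := by
  match l, h with
  | x :: t, _ => rw [PySem.List.min?_id_cons]; rfl

-- ===== VERDICT (by name: the statement is the Claim_ definition above) =====
theorem solution_spec : Claim_equal_solution := by
  intro dump box _hdom hpre
  have hne : box ≠ [] := hpre
  show solution dump box = solution_alt dump box
  -- abbreviations matching solution_alt's locals
  set nI : Int := (box.length : Int) with hnIdef
  set S : Int := box.sum with hSdef
  set T : Int := if dump > 0 then dump else 0 with hTdef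
  set q : Int := PySem.Int.floordiv S nI with hqdef
  set capHi : Int := if S - q * nI ≠ 0 then q + 1 else q with hcapdef
  set desc : List Int := PySem.List.sorted box (fun x => x) true with hdescdef
  set negL : List Int := (desc.reverse).map (fun x => -x) with hnegdef
  set tN : Nat := dump.toNat with htNdef
  have hn0 : 0 < box.length := List.length_pos_iff.mpr hne
  have hnI : (0 : Int) < nI := by rw [hnIdef]; exact_mod_cast hn0
  have hTt : (tN : Int) = T := by rw [htNdef, hTdef]; split_ifs <;> omega
  have hT0 : 0 ≤ T := by rw [hTdef]; split_ifs <;> omega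
  -- A side: dump rounds of stepA
  obtain ⟨hlenf, hsumf, hUf, hLf⟩ := iterate_inv hne tN
  set f : List Int := stepA^[tN] box with hfdef
  have hfne : f ≠ [] := by
    intro hcon
    rw [hcon] at hlenf
    exact hne (List.eq_nil_of_length_eq_zero hlenf.symm)
  have hAeq : solution dump box = listMax f - listMin f := by
    simp only [solution]
    rw [foldl_const_iterate, PySem.List.length_pyRange_one, sub_zero, ← htNdef, ← hfdef,
      max?_getD f hfne, min?_getD f hfne]
  have hBeq : solution_alt dump box = reach desc T capHi - - reach negL T (-q) := rfl
  -- A-side extremal characterisations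
  have hA1 : S ≤ nI * listMax f := by
    have h := List.sum_le_card_nsmul f (listMax f) (fun x hx => le_listMax x hx)
    rw [nsmul_eq_mul] at h
    calc S = f.sum := by rw [hSdef, hsumf]
      _ ≤ (f.length : Int) * listMax f := h
      _ = nI * listMax f := by rw [hlenf, hnIdef]
  have hA1' : nI * listMin f ≤ S := by
    have h := List.card_nsmul_le_sum f (listMin f) (fun x hx => listMin_le x hx)
    rw [nsmul_eq_mul] at h
    calc nI * listMin f = (f.length : Int) * listMin f := by rw [hlenf, hnIdef]
      _ ≤ f.sum := h
      _ = S := by rw [hSdef, hsumf]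
  have hcond : ∀ v : Int, S ≤ nI * v → box.sum ≤ (box.length : Int) * v := by
    intro v hv; rw [← hSdef, ← hnIdef]; exact hv
  have hcond' : ∀ w : Int, nI * w ≤ S → (box.length : Int) * w ≤ box.sum := by
    intro w hw; rw [← hSdef, ← hnIdef]; exact hw
  have hA2 : Ua box (listMax f) ≤ T := by
    have h1 := hUf (listMax f) (hcond _ hA1)
    have h2 : Ua f (listMax f) = 0 :=
      (Ua_eq_zero_iff _ _).mpr (fun x hx => le_listMax x hx)
    rw [h2] at h1
    omega
  have hA2' : La box (listMin f) ≤ T := by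
    have h1 := hLf (listMin f) (hcond' _ hA1')
    have h2 : La f (listMin f) = 0 :=
      (La_eq_zero_iff _ _).mpr (fun x hx => listMin_le x hx)
    rw [h2] at h1
    omega
  have hA3 : ∀ v : Int, S ≤ nI * v → Ua box v ≤ T → listMax f ≤ v := by
    intro v h1 h2
    have h3 := hUf v (hcond _ h1)
    have h4 : Ua f v = 0 := by omega
    exact (Ua_eq_zero_iff f v).mp h4 (listMax f) (listMax_mem hfne)
  have hA3' : ∀ w : Int, nI * w ≤ S → La box w ≤ T → w ≤ listMin f := by
    intro w h1 h2
    have h3 := hLf w (hcond' _ h1)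
    have h4 : La f w = 0 := by omega
    exact (La_eq_zero_iff f w).mp h4 (listMin f) (listMin_mem hfne)
  -- division facts
  have hqf : q * nI ≤ S ∧ S < (q + 1) * nI :=
    (PySem.Int.floordiv_eq_iff_of_pos hnI).mp hqdef.symm
  have hq1 : nI * q ≤ S := by rw [mul_comm]; exact hqf.1
  have hq2 : ∀ w : Int, nI * w ≤ S → w ≤ q := by
    intro w hw
    have h1 : w * nI < (q + 1) * nI := by rw [mul_comm] at hw; linarith [hqf.2]
    have := lt_of_mul_lt_mul_right h1 (le_of_lt hnI)
    omega
  have hcap1 : S ≤ nI * capHi := by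
    rw [hcapdef]
    split_ifs with hr0
    · rw [mul_add, mul_one, mul_comm]
      linarith [hqf.2]
    · push_neg at hr0
      rw [mul_comm]
      linarith
  have hcap2 : ∀ v : Int, S ≤ nI * v → capHi ≤ v := by
    intro v hv
    rw [hcapdef]
    split_ifs with hr0
    · have h1 : q * nI < S := lt_of_le_of_ne hqf.1 (by intro hcon; apply hr0; linarith)
      have h2 : q * nI < v * nI := by rw [mul_comm] at hv; linarith
      have := lt_of_mul_lt_mul_right h2 (le_of_lt hnI)
      omega
    · have h2 : q * nI ≤ v * nI := by
        push_neg at hr0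
        rw [mul_comm] at hv
        linarith
      exact le_of_mul_le_mul_right h2 hnI
  -- sorted list facts
  have hdperm : desc.Perm box := PySem.List.sorted_perm box _ true
  have hdpw : desc.Pairwise (· ≥ ·) := PySem.List.sorted_pairwise_rev box (fun x => x)
  have hdne : desc ≠ [] := by
    intro hcon
    have hlen := PySem.List.length_sorted box (fun x => x) true
    rw [← hdescdef, hcon] at hlen
    exact hne (List.eq_nil_of_length_eq_zero hlen.symm)
  have hUdesc : ∀ v, Ua desc v = Ua box v := fun v => Ua_perm hdperm v
  have hdmax : capHi ≤ listMax desc := by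
    apply hcap2
    have h := List.sum_le_card_nsmul desc (listMax desc) (fun x hx => le_listMax x hx)
    rw [nsmul_eq_mul] at h
    calc S = desc.sum := (hdperm.sum_eq).symm
      _ ≤ (desc.length : Int) * listMax desc := h
      _ = nI * listMax desc := by
          rw [PySem.List.length_sorted box (fun x => x) true, hnIdef]
  obtain ⟨hB1, hB2, hB3⟩ := reach_spec T capHi desc hdne hdpw hT0 hdmax
  have hhi : reach desc T capHi = listMax f := by
    apply le_antisymm
    · exact hB3 (listMax f) (hcap2 _ hA1) (by rw [hUdesc]; exact hA2)
    · apply hA3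
      · calc S ≤ nI * capHi := hcap1
          _ ≤ nI * reach desc T capHi := by
              apply mul_le_mul_of_nonneg_left hB1 (le_of_lt hnI)
      · rw [← hUdesc]; exact hB2
  -- negated list for the min side
  have hnegpw : negL.Pairwise (· ≥ ·) := by
    rw [hnegdef, List.pairwise_map, List.pairwise_reverse]
    exact hdpw.imp (by intro a b hab; omega)
  have hnegne : negL ≠ [] := by
    rw [hnegdef]
    intro hcon
    rw [List.map_eq_nil_iff, List.reverse_eq_nil_iff] at hcon
    exact hdne hcon
  have hnegperm : negL.Perm (box.map (fun x => -x)) := by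
    rw [hnegdef]
    exact (desc.reverse_perm.map _).trans (hdperm.map _)
  have hUneg : ∀ w : Int, Ua negL (-w) = La box w :=
    fun w => (Ua_perm hnegperm _).trans (Ua_neg_map box w)
  have hnegmax : -q ≤ listMax negL := by
    have hmb : listMin box ≤ q := by
      apply hq2
      have h := List.card_nsmul_le_sum box (listMin box) (fun x hx => listMin_le x hx)
      rw [nsmul_eq_mul] at h
      rw [hnIdef, hSdef]
      exact h
    have hmem : -(listMin box) ∈ negL :=
      hnegperm.mem_iff.mpr (List.mem_map_of_mem (listMin_mem hne))
    have := le_listMax _ hmem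
    omega
  obtain ⟨hB1', hB2', hB3'⟩ := reach_spec T (-q) negL hnegne hnegpw hT0 hnegmax
  have hlo : -(reach negL T (-q)) = listMin f := by
    apply le_antisymm
    · apply hA3'
      · have h1 : -(reach negL T (-q)) ≤ q := by linarith [hB1']
        calc nI * -(reach negL T (-q)) ≤ nI * q :=
              mul_le_mul_of_nonneg_left h1 (le_of_lt hnI)
          _ ≤ S := hq1
      · have h2 := hB2'
        rw [show reach negL T (-q) = -(-(reach negL T (-q))) by ring] at h2
        rw [hUneg] at h2
        exact h2
    · have h2 : reach negL T (-q) ≤ -(listMin f) := by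
        apply hB3'
        · have : listMin f ≤ q := hq2 _ hA1'
          omega
        · rw [hUneg]; exact hA2'
      linarith
  rw [hAeq, hBeq, hhi, hlo]
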